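-- pv_equiv track=rewrite | github.com/daniellaranjoadm-dorange/GED_PROFISSIONAL | Monitor_Fundido_Service_5.9.py | _suffix_key
-- ===== SOURCE A (Python) =====
-- def _suffix_key(s: str) -> int:
--     s = (s or "").strip().upper()
--     if s == "":
--         return -1
--     if s.isalpha():
--         n = 0
--         for ch in s:
--             n = n * 26 + (ord(ch) - ord('A') + 1)
--         return n
--     return -1
-- ===== SOURCE B (Python) =====
-- def _suffix_key(s: str) -> int:
--     t = (s or "").strip().upper()
--     if not (t and t.isalpha()):
--         return -1
--     pows = [1]
--     for _ in range(len(t) - 1):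
--         pows.append(pows[-1] * 26)
--     return sum((ord(c) - 64) * p for c, p in zip(t, reversed(pows)))
-- ===== Notes on version B (the rewrite author's own statement) =====
-- stated objective: alternative
-- what changed: Replaces A's Horner accumulator loop and two-step guard chain with a single combined guard and a staged positional sum: a powers-of-26 list is built once, then each digit is multiplied by its place value via zip with the reversed powers.
import Mathlib
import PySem

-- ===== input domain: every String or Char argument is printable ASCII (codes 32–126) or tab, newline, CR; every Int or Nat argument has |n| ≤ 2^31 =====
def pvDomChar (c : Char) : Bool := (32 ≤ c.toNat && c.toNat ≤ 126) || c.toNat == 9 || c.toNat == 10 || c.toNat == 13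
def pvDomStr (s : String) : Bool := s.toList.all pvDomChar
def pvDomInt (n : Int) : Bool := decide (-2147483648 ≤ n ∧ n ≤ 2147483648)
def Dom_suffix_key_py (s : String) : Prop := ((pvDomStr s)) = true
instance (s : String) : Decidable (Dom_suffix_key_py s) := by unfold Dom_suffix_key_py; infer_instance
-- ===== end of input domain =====

-- B: combined guard, a precomputed powers-of-26 list and a zip-based positional sum, instead of A's Horner loop (alternative decomposition, same cost).

-- ===== PORT A =====
def suffix_key_py (s : String) : Int :=
  let t := PySem.Chars.upper (PySem.Chars.strip s.toList)  -- s = (s or "").strip().upper(); 'or' is identity on strings here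
  if t = [] then -1
  else if PySem.Chars.strIsalpha t then
    t.foldl (fun n ch => n * 26 + ((ch.toNat : Int) - 65 + 1)) 0
  else -1

-- ===== PORT B =====
def suffix_key_py_alt (s : String) : Int :=
  let t := PySem.Chars.upper (PySem.Chars.strip s.toList)
  if ¬ (t ≠ [] ∧ PySem.Chars.strIsalpha t) then -1
  else
    -- pows = [1]; for _ in range(len(t)-1): pows.append(pows[-1]*26)
    let pows := (List.range (t.length - 1)).foldl
      (fun (ps : List Int) _ => ps ++ [ps.getLast! * 26]) [1]
    -- sum((ord(c) - 64) * p for c, p in zip(t, reversed(pows)))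
    ((t.zip pows.reverse).map (fun p => ((p.1.toNat : Int) - 64) * p.2)).sum

-- ===== PRECONDITION & SPEC =====
def Spec_suffix_key_py (s : String) (out : Int) : Prop := out = suffix_key_py_alt s
instance (s : String) (out : Int) : Decidable (Spec_suffix_key_py s out) := by unfold Spec_suffix_key_py; infer_instance

-- ===== CLAIM (what is proved, stated in full; the proofs are below) =====
def Claim_equal_suffix_key_py : Prop := ∀ (s : String), Dom_suffix_key_py s → Spec_suffix_key_py s (suffix_key_py s)

-- ===== LEMMAS AND PROOFS =====

-- ===== VERDICT (by name: the statement is the Claim_ definition above) =====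
-- descending powers [26^(n-1), …, 26^0]; proof-side characterisation of B's reversed powers list
def pvDescPows : Nat → List Int
  | 0 => []
  | n + 1 => 26 ^ n :: pvDescPows n

theorem pv_pows_build (m : Nat) :
    (List.range m).foldl (fun (ps : List Int) _ => ps ++ [ps.getLast! * 26]) [1]
      = (List.range (m + 1)).map (fun i => (26 : Int) ^ i) := by
  induction m with
  | zero => simp
  | succ m ih =>
    rw [List.range_succ, List.foldl_append, List.foldl_cons, List.foldl_nil, ih,
      List.range_succ (n := m + 1), List.map_append, List.range_succ (n := m), List.map_append]
    simp [pow_succ]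

theorem pv_rev_pows (n : Nat) :
    ((List.range n).map (fun i => (26 : Int) ^ i)).reverse = pvDescPows n := by
  induction n with
  | zero => simp [pvDescPows]
  | succ n ih => rw [List.range_succ, List.map_append]; simp [pvDescPows, ih]

theorem pv_horner_eq_zip (l : List Char) (a : Int) :
    l.foldl (fun n ch => n * 26 + ((ch.toNat : Int) - 65 + 1)) a
      = a * 26 ^ l.length +
        ((l.zip (pvDescPows l.length)).map (fun p => ((p.1.toNat : Int) - 64) * p.2)).sum := by
  induction l generalizing a with
  | nil => simp [pvDescPows]
  | cons c l ih =>
    rw [List.foldl_cons, ih]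
    simp only [List.length_cons, pvDescPows, List.zip_cons_cons, List.map_cons, List.sum_cons]
    rw [pow_succ]
    ring

-- ===== VERDICT (by name: the statement is the Claim_ definition above) =====
theorem suffix_key_py_spec : Claim_equal_suffix_key_py := by
  intro s _
  unfold Spec_suffix_key_py suffix_key_py suffix_key_py_alt
  set t := PySem.Chars.upper (PySem.Chars.strip s.toList) with ht
  by_cases h0 : t = []
  · simp [h0]
  · by_cases ha : PySem.Chars.strIsalpha t
    · have hlen : t.length - 1 + 1 = t.length := by
        have : t.length ≠ 0 := by simpa [List.length_eq_zero_iff] using h0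
        omega
      rw [if_neg h0, if_pos ha,
        if_neg (show ¬¬(t ≠ [] ∧ PySem.Chars.strIsalpha t = true) by simp [h0, ha]),
        pv_pows_build, hlen]
      simp only [pv_rev_pows, pv_horner_eq_zip]
      ring
    · simp [h0, ha]
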